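-- pv_equiv track=rewrite | github.com/ajmedeio/algos | src/85-maximal-rectangle/85. Maximal Rectangle.py | build_histograms
-- ===== SOURCE A (Python) =====
-- def build_histograms(matrix: list[[str]]) -> list[list[int]]:
--     n = len(matrix)
--     m = len(matrix[0])
--     out = [[0 for _ in range(m)] for _ in range(n)]
--     for j in range(m):
--         out[0][j] = int(matrix[0][j])
--     for i in range(1, n):
--         for j in range(m):
--             # increment the count or reset to zero
--             if matrix[i][j] == "0":
--                 out[i][j] = 0
--             else:
--                 out[i][j] = out[i-1][j] + 1
--     return out
-- ===== SOURCE B (Python) =====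
-- def build_histograms(matrix: list[[str]]) -> list[list[int]]:
--     n = len(matrix)
--     m = len(matrix[0])
--     # Column-major: per column keep the index of the last '0' seen (rows 1..),
--     # each cell is then the closed form i - last_zero (or i + first value if no
--     # '0' has occurred yet); finally transpose the columns back into rows.
--     cols = []
--     for j in range(m):
--         c0 = int(matrix[0][j])
--         col = [c0]
--         lz = None
--         for i in range(1, n):
--             if matrix[i][j] == "0":
--                 lz = i
--                 col.append(0)
--             elif lz is None:
--                 col.append(i + c0)
--             else:
--                 col.append(i - lz)
--         cols.append(col)
--     return [[cols[j][i] for j in range(m)] for i in range(n)]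
-- ===== Notes on version B (the rewrite author's own statement) =====
-- stated objective: alternative
-- what changed: B traverses column-major and replaces the DP lookback out[i-1][j]+1 by a closed form: it tracks the index of the last '0' in each column and writes i - last_zero (or i + int(matrix[0][j]) when no '0' has occurred), then transposes the per-column lists back into rows.
import Mathlib
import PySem

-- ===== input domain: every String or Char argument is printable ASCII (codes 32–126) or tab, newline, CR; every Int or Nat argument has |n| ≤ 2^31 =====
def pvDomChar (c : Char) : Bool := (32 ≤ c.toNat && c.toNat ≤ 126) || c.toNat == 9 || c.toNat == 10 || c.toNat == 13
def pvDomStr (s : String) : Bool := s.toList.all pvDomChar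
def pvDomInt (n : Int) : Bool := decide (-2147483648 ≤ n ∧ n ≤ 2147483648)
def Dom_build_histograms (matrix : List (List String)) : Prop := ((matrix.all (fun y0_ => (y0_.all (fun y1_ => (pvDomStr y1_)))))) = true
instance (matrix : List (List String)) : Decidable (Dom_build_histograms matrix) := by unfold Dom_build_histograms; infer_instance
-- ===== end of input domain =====

-- B traverses column-major, tracking the index of the last '0' per column and writing the
-- closed form i - last_zero (or i + int(matrix[0][j]) before any '0'), then transposes
-- the columns back into rows (objective: alternative algorithm, same cost).

-- ===== PORT A =====
-- literal port of A: pre-allocated table modelled by growing the row list; row 0 seeded from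
-- int(matrix[0][j]), then for i in range(1,n) each cell reads out[i-1][j] back from the table.
def build_histograms (matrix : List (List String)) : List (List Int) :=
  let n : Int := matrix.length
  let m : Int := (PySem.List.pyGetD matrix 0 []).length
  let row0 : List Int := (PySem.List.pyRange 0 m 1).map
    (fun j => (PySem.Int.ofStr? (PySem.List.pyGetD (PySem.List.pyGetD matrix 0 []) j "")).getD 0)
  (PySem.List.pyRange 1 n 1).foldl
    (fun out i =>
      out ++ [(PySem.List.pyRange 0 m 1).map
        (fun j =>
          if PySem.List.pyGetD (PySem.List.pyGetD matrix i []) j "" == "0" then (0 : Int)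
          else PySem.List.pyGetD (PySem.List.pyGetD out (i - 1) []) j 0 + 1)])
    [row0]

-- ===== PORT B =====
-- literal port of Source B: for each column j, fold over i in range(1,n) threading (col, lz);
-- lz is the last index with matrix[i][j]=='0'; finally transpose cols back into rows.
def build_histograms_alt (matrix : List (List String)) : List (List Int) :=
  let n : Int := matrix.length
  let m : Int := (matrix.headD []).length
  let cols : List (List Int) := (PySem.List.pyRange 0 m 1).map (fun j =>
    let c0 : Int := (PySem.Int.ofStr? (PySem.List.pyGetD (matrix.headD []) j "")).getD 0
    ((PySem.List.pyRange 1 n 1).foldl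
      (fun (p : List Int × Option Int) i =>
        if PySem.List.pyGetD (PySem.List.pyGetD matrix i []) j "" == "0" then
          (p.1 ++ [(0 : Int)], some i)
        else match p.2 with
          | none => (p.1 ++ [i + c0], p.2)
          | some lz => (p.1 ++ [i - lz], p.2))
      ([c0], none)).1)
  (PySem.List.pyRange 0 n 1).map (fun i =>
    (PySem.List.pyRange 0 m 1).map (fun j =>
      PySem.List.pyGetD (PySem.List.pyGetD cols j []) i 0))

-- ===== PRECONDITION & SPEC =====
-- Pre_ excludes exactly the inputs where Python A raises: the empty matrix (IndexError on
-- matrix[0]), a row shorter than the first row (IndexError on matrix[i][j]), and a first-row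
-- entry int() cannot parse (ValueError).
def Pre_build_histograms (matrix : List (List String)) : Prop :=
  matrix ≠ [] ∧
  (∀ row ∈ matrix, (matrix.headD []).length ≤ row.length) ∧
  (∀ s ∈ matrix.headD [], (PySem.Int.ofStr? s).isSome)
instance (matrix : List (List String)) : Decidable (Pre_build_histograms matrix) := by
  unfold Pre_build_histograms; infer_instance
def pvWitness_build_histograms : List (List String) := [["1", "0"], ["1", "1"], ["0", "1"]]
def Spec_build_histograms (matrix : List (List String)) (out : List (List Int)) : Prop := out = build_histograms_alt matrix
instance (matrix : List (List String)) (out : List (List Int)) : Decidable (Spec_build_histograms matrix out) := by unfold Spec_build_histograms; infer_instance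

-- ===== CLAIM (what is proved, stated in full; the proofs are below) =====
def Claim_equal_build_histograms : Prop := ∀ (matrix : List (List String)), Dom_build_histograms matrix → Pre_build_histograms matrix → Spec_build_histograms matrix (build_histograms matrix)

-- ===== LEMMAS AND PROOFS =====

-- the common recurrence both programs compute: column j, row index t
def pvR (matrix : List (List String)) (j : Int) : Nat → Int
  | 0 => (PySem.Int.ofStr? (PySem.List.pyGetD (PySem.List.pyGetD matrix 0 []) j "")).getD 0
  | (s + 1) =>
      if PySem.List.pyGetD (PySem.List.pyGetD matrix ((s : Int) + 1) []) j "" == "0" then 0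
      else pvR matrix j s + 1

theorem pv_getD_map_range {α : Type} (f : Nat → α) (n i : Nat) (d : α) (h : i < n) :
    ((List.range n).map f).getD i d = f i := by
  simp [List.getD, h]

theorem pv_A_loop (matrix : List (List String)) (m : Int) :
    ∀ (rows : List (List String)) (i : Nat), matrix.drop i = rows → 1 ≤ i → i ≤ matrix.length →
    (PySem.List.pyRange (i : Int) (matrix.length : Int) 1).foldl
      (fun out k => out ++ [(PySem.List.pyRange 0 m 1).map
        (fun j =>
          if PySem.List.pyGetD (PySem.List.pyGetD matrix k []) j "" == "0" then (0 : Int)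
          else PySem.List.pyGetD (PySem.List.pyGetD out (k - 1) []) j 0 + 1)])
      ((List.range i).map (fun t => (PySem.List.pyRange 0 m 1).map (fun j => pvR matrix j t)))
    = (List.range matrix.length).map (fun t => (PySem.List.pyRange 0 m 1).map (fun j => pvR matrix j t)) := by
  intro rows
  induction rows with
  | nil =>
      intro i hdrop _ hle
      have hlen : matrix.length ≤ i := by
        have h2 := congrArg List.length hdrop
        simp [List.length_drop] at h2
        omega
      have : i = matrix.length := le_antisymm hle hlen
      subst this
      rw [PySem.List.pyRange_one_eq_nil le_rfl]
      simp [List.foldl]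
  | cons row rows' ih =>
      intro i hdrop h1 _
      have hi_lt : i < matrix.length := by
        by_contra h
        have h2 := congrArg List.length hdrop
        simp [List.length_drop] at h2
        omega
      have hdrop' : matrix.drop (i + 1) = rows' := by
        have h3 : matrix.drop (i + 1) = (matrix.drop i).drop 1 := by rw [List.drop_drop]
        rw [h3, hdrop]; rfl
      obtain ⟨s, rfl⟩ : ∃ s, i = s + 1 := ⟨i - 1, by omega⟩
      rw [PySem.List.pyRange_one_cons (a := ((s + 1 : Nat) : Int)) (b := (matrix.length : Int)) (by exact_mod_cast hi_lt)]
      simp only [List.foldl_cons]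
      have hprev : PySem.List.pyGetD
          ((List.range (s + 1)).map (fun t => (PySem.List.pyRange 0 m 1).map (fun j => pvR matrix j t)))
          (((s + 1 : Nat) : Int) - 1) []
          = (PySem.List.pyRange 0 m 1).map (fun j => pvR matrix j s) := by
        have hcast : (((s + 1 : Nat) : Int) - 1) = ((s : Nat) : Int) := by push_cast; ring
        rw [hcast, PySem.List.pyGetD_natCast]
        exact pv_getD_map_range _ _ _ _ (by omega)
      have hrow : ((PySem.List.pyRange 0 m 1).map
          (fun j =>
            if PySem.List.pyGetD (PySem.List.pyGetD matrix ((s + 1 : Nat) : Int) []) j "" == "0" then (0 : Int)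
            else PySem.List.pyGetD (PySem.List.pyGetD
              ((List.range (s + 1)).map (fun t => (PySem.List.pyRange 0 m 1).map (fun j' => pvR matrix j' t)))
              (((s + 1 : Nat) : Int) - 1) []) j 0 + 1))
          = (PySem.List.pyRange 0 m 1).map (fun j => pvR matrix j (s + 1)) := by
        apply List.map_congr_left
        intro j hj
        have hjb := (PySem.List.mem_pyRange_one).1 hj
        rw [hprev]
        rw [PySem.List.pyGetD_map_pyRange_of_nonneg _ _ _ _ hjb.1 hjb.2]
        have hc : (((s + 1 : Nat)) : Int) = ((s : Nat) : Int) + 1 := by push_cast; ring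
        simp only [pvR, hc]
      rw [hrow]
      have hacc : ((List.range (s + 1)).map (fun t => (PySem.List.pyRange 0 m 1).map (fun j => pvR matrix j t)))
          ++ [(PySem.List.pyRange 0 m 1).map (fun j => pvR matrix j (s + 1))]
          = (List.range (s + 1 + 1)).map (fun t => (PySem.List.pyRange 0 m 1).map (fun j => pvR matrix j t)) := by
        conv_rhs => rw [List.range_succ]
        rw [List.map_append]; rfl
      rw [hacc]
      have h5 := ih (s + 1 + 1) hdrop' (by omega) (by omega)
      have hc2 : (((s + 1 : Nat) : Int) + 1) = (((s + 1 + 1 : Nat)) : Int) := by push_cast; ring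
      rw [hc2]
      exact h5

theorem pv_B_col (matrix : List (List String)) (j c0 : Int) :
    ∀ (rows : List (List String)) (i : Nat) (st : Option Int), matrix.drop i = rows →
    1 ≤ i → i ≤ matrix.length →
    (st = none → pvR matrix j (i - 1) = ((i : Int) - 1) + c0) →
    (∀ lz, st = some lz → pvR matrix j (i - 1) = ((i : Int) - 1) - lz) →
    ((PySem.List.pyRange (i : Int) (matrix.length : Int) 1).foldl
      (fun (p : List Int × Option Int) k =>
        if PySem.List.pyGetD (PySem.List.pyGetD matrix k []) j "" == "0" then
          (p.1 ++ [(0 : Int)], some k)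
        else match p.2 with
          | none => (p.1 ++ [k + c0], p.2)
          | some lz => (p.1 ++ [k - lz], p.2))
      ((List.range i).map (pvR matrix j), st)).1
    = (List.range matrix.length).map (pvR matrix j) := by
  intro rows
  induction rows with
  | nil =>
      intro i st hdrop _ hle _ _
      have hlen : matrix.length ≤ i := by
        have h2 := congrArg List.length hdrop
        simp [List.length_drop] at h2
        omega
      have : i = matrix.length := le_antisymm hle hlen
      subst this
      rw [PySem.List.pyRange_one_eq_nil le_rfl]
      simp [List.foldl]
  | cons row rows' ih =>
      intro i st hdrop h1 _ hnone hsome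
      have hi_lt : i < matrix.length := by
        by_contra h
        have h2 := congrArg List.length hdrop
        simp [List.length_drop] at h2
        omega
      have hdrop' : matrix.drop (i + 1) = rows' := by
        have h3 : matrix.drop (i + 1) = (matrix.drop i).drop 1 := by rw [List.drop_drop]
        rw [h3, hdrop]; rfl
      obtain ⟨s, rfl⟩ : ∃ s, i = s + 1 := ⟨i - 1, by omega⟩
      rw [PySem.List.pyRange_one_cons (a := ((s + 1 : Nat) : Int)) (b := (matrix.length : Int)) (by exact_mod_cast hi_lt)]
      simp only [List.foldl_cons]
      have hc : (((s + 1 : Nat)) : Int) = ((s : Nat) : Int) + 1 := by push_cast; ring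
      have hR : pvR matrix j (s + 1)
          = if PySem.List.pyGetD (PySem.List.pyGetD matrix ((s + 1 : Nat) : Int) []) j "" == "0" then 0
            else pvR matrix j s + 1 := by
        rw [hc]; simp only [pvR]
      have hacc1 : ∀ v : Int, v = pvR matrix j (s + 1) →
          (List.range (s + 1)).map (pvR matrix j) ++ [v]
          = (List.range (s + 1 + 1)).map (pvR matrix j) := by
        intro v hv
        rw [hv]
        conv_rhs => rw [List.range_succ]
        rw [List.map_append]; rfl
      by_cases hzero : PySem.List.pyGetD (PySem.List.pyGetD matrix ((s + 1 : Nat) : Int) []) j "" == "0"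
      · simp only [hzero, if_true]
        have hv0 : pvR matrix j (s + 1) = 0 := by rw [hR, hzero]; rfl
        rw [hacc1 0 hv0.symm]
        have h5 := ih (s + 1 + 1) (some ((s + 1 : Nat) : Int)) hdrop' (by omega) (by omega)
          (by intro h; cases h)
          (by intro lz hlz
              injection hlz with hlz
              subst hlz
              simp only [Nat.add_sub_cancel]
              rw [hv0]; push_cast; ring)
        have hc2 : (((s + 1 : Nat) : Int) + 1) = (((s + 1 + 1 : Nat)) : Int) := by push_cast; ring
        rw [hc2]; exact h5
      · simp only [hzero]
        have hvsucc : pvR matrix j (s + 1) = pvR matrix j s + 1 := by rw [hR, if_neg hzero]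
        cases st with
        | none =>
            simp only []
            have hps : pvR matrix j s = ((s : Int) + 1 - 1) + c0 := by
              have := hnone rfl; simpa using this
            have hv : ((s + 1 : Nat) : Int) + c0 = pvR matrix j (s + 1) := by
              rw [hvsucc, hps]; push_cast; ring
            rw [hacc1 _ hv]
            have h5 := ih (s + 1 + 1) none hdrop' (by omega) (by omega)
              (by intro _
                  simp only [Nat.add_sub_cancel]
                  rw [hvsucc, hps]; push_cast; ring)
              (by intro lz hlz; cases hlz)
            have hc2 : (((s + 1 : Nat) : Int) + 1) = (((s + 1 + 1 : Nat)) : Int) := by push_cast; ring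
            rw [hc2]; exact h5
        | some lz =>
            simp only []
            have hps : pvR matrix j s = ((s : Int) + 1 - 1) - lz := by
              have := hsome lz rfl; simpa using this
            have hv : ((s + 1 : Nat) : Int) - lz = pvR matrix j (s + 1) := by
              rw [hvsucc, hps]; push_cast; ring
            rw [hacc1 _ hv]
            have h5 := ih (s + 1 + 1) (some lz) hdrop' (by omega) (by omega)
              (by intro h; cases h)
              (by intro lz' hlz'
                  injection hlz' with hlz'
                  subst hlz'
                  simp only [Nat.add_sub_cancel]
                  rw [hvsucc, hps]; push_cast; ring)
            have hc2 : (((s + 1 : Nat) : Int) + 1) = (((s + 1 + 1 : Nat)) : Int) := by push_cast; ring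
            rw [hc2]; exact h5

theorem pv_transpose (n' : Nat) (m : Int) (g : Int → Nat → Int) :
    (PySem.List.pyRange 0 (n' : Int) 1).map (fun i =>
      (PySem.List.pyRange 0 m 1).map (fun j =>
        PySem.List.pyGetD (PySem.List.pyGetD
          ((PySem.List.pyRange 0 m 1).map (fun j' => (List.range n').map (g j'))) j []) i 0))
    = (List.range n').map (fun t => (PySem.List.pyRange 0 m 1).map (fun j => g j t)) := by
  rw [PySem.List.pyRange_one (a := 0) (b := (n' : Int))]
  have hn : (((n' : Int)) - 0).toNat = n' := by omega
  rw [hn, List.map_map]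
  apply List.map_congr_left
  intro k hk
  have hk' : k < n' := List.mem_range.1 hk
  simp only [Function.comp]
  apply List.map_congr_left
  intro j hj
  have hjb := (PySem.List.mem_pyRange_one).1 hj
  rw [PySem.List.pyGetD_map_pyRange_of_nonneg _ _ _ _ hjb.1 hjb.2]
  have hc : ((0 : Int) + (k : Nat)) = ((k : Nat) : Int) := by ring
  rw [hc, PySem.List.pyGetD_natCast]
  exact pv_getD_map_range _ _ _ _ hk'

-- ===== VERDICT (by name: the statement is the Claim_ definition above) =====
theorem build_histograms_spec : Claim_equal_build_histograms := by
  intro matrix _ hpre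
  obtain ⟨hne, _, _⟩ := hpre
  unfold Spec_build_histograms build_histograms build_histograms_alt
  obtain ⟨h, t, rfl⟩ := List.exists_cons_of_ne_nil hne
  simp only [List.headD_cons, PySem.List.pyGetD_zero_cons]
  -- A side
  have hrow0 : (PySem.List.pyRange 0 (h.length : Int) 1).map
      (fun j => (PySem.Int.ofStr? (PySem.List.pyGetD h j "")).getD 0)
      = (PySem.List.pyRange 0 (h.length : Int) 1).map (fun j => pvR (h :: t) j 0) := by
    apply List.map_congr_left
    intro j _
    simp [pvR, PySem.List.pyGetD_zero_cons]
  have hA := pv_A_loop (h :: t) (h.length : Int) t 1 (by simp) le_rfl (by simp)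
  simp only [List.range_one, List.map_cons, List.map_nil] at hA
  -- B side
  have hcols : ∀ j : Int,
      (((PySem.List.pyRange 1 ((h :: t).length : Int) 1).foldl
        (fun (p : List Int × Option Int) i =>
          if PySem.List.pyGetD (PySem.List.pyGetD (h :: t) i []) j "" == "0" then
            (p.1 ++ [(0 : Int)], some i)
          else match p.2 with
            | none => (p.1 ++ [i + (PySem.Int.ofStr? (PySem.List.pyGetD h j "")).getD 0], p.2)
            | some lz => (p.1 ++ [i - (lz : Int)], p.2))
        ([(PySem.Int.ofStr? (PySem.List.pyGetD h j "")).getD 0], none)).1)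
      = (List.range (h :: t).length).map (pvR (h :: t) j) := by
    intro j
    have hc0 : (PySem.Int.ofStr? (PySem.List.pyGetD h j "")).getD 0 = pvR (h :: t) j 0 := by
      simp [pvR, PySem.List.pyGetD_zero_cons]
    have hB := pv_B_col (h :: t) j ((PySem.Int.ofStr? (PySem.List.pyGetD h j "")).getD 0)
      t 1 none (by simp) le_rfl (by simp)
      (by intro _
          rw [hc0]
          simp)
      (by intro lz hlz; cases hlz)
    simp only [List.range_one, List.map_cons, List.map_nil] at hB
    simp only [hc0] at hB ⊢
    exact_mod_cast hB
  calc (PySem.List.pyRange 1 ((h :: t).length : Int) 1).foldl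
        (fun out i => out ++ [(PySem.List.pyRange 0 (h.length : Int) 1).map
          (fun j =>
            if PySem.List.pyGetD (PySem.List.pyGetD (h :: t) i []) j "" == "0" then (0 : Int)
            else PySem.List.pyGetD (PySem.List.pyGetD out (i - 1) []) j 0 + 1)])
        [(PySem.List.pyRange 0 (h.length : Int) 1).map
          (fun j => (PySem.Int.ofStr? (PySem.List.pyGetD h j "")).getD 0)]
      = (List.range (h :: t).length).map
          (fun s => (PySem.List.pyRange 0 (h.length : Int) 1).map (fun j => pvR (h :: t) j s)) := by
        rw [hrow0]
        exact_mod_cast hA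
    _ = (PySem.List.pyRange 0 (((h :: t).length : Nat) : Int) 1).map (fun i =>
          (PySem.List.pyRange 0 (h.length : Int) 1).map (fun j =>
            PySem.List.pyGetD (PySem.List.pyGetD
              ((PySem.List.pyRange 0 (h.length : Int) 1).map
                (fun j' => (List.range (h :: t).length).map (pvR (h :: t) j'))) j []) i 0)) := by
        rw [pv_transpose (h :: t).length (h.length : Int) (pvR (h :: t))]
    _ = (PySem.List.pyRange 0 ((h :: t).length : Int) 1).map (fun i =>
          (PySem.List.pyRange 0 (h.length : Int) 1).map (fun j =>
            PySem.List.pyGetD (PySem.List.pyGetD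
              ((PySem.List.pyRange 0 (h.length : Int) 1).map (fun j' =>
                ((PySem.List.pyRange 1 ((h :: t).length : Int) 1).foldl
                  (fun (p : List Int × Option Int) i' =>
                    if PySem.List.pyGetD (PySem.List.pyGetD (h :: t) i' []) j' "" == "0" then
                      (p.1 ++ [(0 : Int)], some i')
                    else match p.2 with
                      | none => (p.1 ++ [i' + (PySem.Int.ofStr? (PySem.List.pyGetD h j' "")).getD 0], p.2)
                      | some lz => (p.1 ++ [i' - lz], p.2))
                  ([(PySem.Int.ofStr? (PySem.List.pyGetD h j' "")).getD 0], none)).1)) j []) i 0)) := by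
        apply List.map_congr_left
        intro i _
        apply List.map_congr_left
        intro j _
        congr 1
        congr 1
        apply List.map_congr_left
        intro j' _
        exact (hcols j').symm
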